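-- pv_equiv track=rewrite | github.com/adaptive-cfd/python-tools | wabbit_tools.py | tc_decoding
-- ===== SOURCE A (Python) =====
-- def tc_decoding(treecode, level=None, dim=3, max_level=21):
--     """
--     Obtain block position coordinates from numerical binary treecode.
--     Works for 2D and 3D. Considers each digit and adds their level-shift to each coordinate.
--
--     Parameters:
--     - treecode: int, treecode value
--     - level: int, level at which to encode, can be negative to set from max_level
--     - dim: int, dimension (2 or 3), defaults to 3
--     - max_level: int, max level possible, should be set after params%Jmax
--
--     Returns:
--     - ix: list of int, block position coordinates
--     """
--
--     n_level = max_level if level is None else level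
--     if n_level < 0: n_level = max_level + n_level + 1
--
--     # 1-based
--     ix = [1] * dim
--
--     for i_level in range(n_level):
--         for i_dim in range(dim):
--             shift = (i_level + max_level - n_level) * dim + i_dim
--             bit = (treecode >> shift) & 1
--             ix[i_dim] += bit << i_level
--
--     ix[0], ix[1] = ix[1], ix[0]
--
--     return ix
-- ===== SOURCE B (Python) =====
-- def tc_decoding(treecode, level=None, dim=3, max_level=21):
--     n_level = max_level if level is None else level
--     if n_level < 0:
--         n_level = max_level + n_level + 1
--     # align once, then consume the quotient one bit at a time with divmod,
--     # distributing bits cyclically over the dimensions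
--     v = treecode >> (max_level - n_level) * dim
--     ix = [1] * dim
--     for k in range(n_level * dim):
--         v, bit = divmod(v, 2)
--         ix[k % dim] += bit << (k // dim)
--     ix[0], ix[1] = ix[1], ix[0]
--     return ix
-- ===== Notes on version B (the rewrite author's own statement) =====
-- stated objective: alternative
-- what changed: B aligns the treecode with one shift and then consumes it as a running quotient, one flat divmod-by-2 loop over all n_level*dim bits distributed cyclically to the dimensions, instead of A's nested level/dimension loops that re-extract each bit from the original treecode by a computed shift.
-- outside the precondition, e.g. on tc_decoding(0, 0, 2, -1): A returns [1, 1], B raises ValueError; on tc_decoding(5, 2, 1, 3): A raises IndexError, B raises IndexError; on tc_decoding(5, 7, 2, 3): A raises ValueError, B raises ValueError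
import Mathlib
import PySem

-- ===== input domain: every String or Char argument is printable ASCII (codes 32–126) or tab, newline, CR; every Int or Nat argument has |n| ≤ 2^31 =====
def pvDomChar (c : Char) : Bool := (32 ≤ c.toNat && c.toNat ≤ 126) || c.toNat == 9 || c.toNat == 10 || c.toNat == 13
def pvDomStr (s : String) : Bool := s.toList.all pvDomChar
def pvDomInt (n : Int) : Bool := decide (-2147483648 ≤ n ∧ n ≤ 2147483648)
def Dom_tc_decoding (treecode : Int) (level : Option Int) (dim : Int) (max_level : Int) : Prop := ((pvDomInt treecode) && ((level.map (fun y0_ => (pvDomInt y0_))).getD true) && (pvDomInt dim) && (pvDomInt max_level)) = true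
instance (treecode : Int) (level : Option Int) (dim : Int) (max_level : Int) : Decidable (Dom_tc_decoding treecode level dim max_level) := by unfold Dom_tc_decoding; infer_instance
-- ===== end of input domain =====

-- B aligns the treecode with one shift and then consumes it as a running quotient in ONE flat divmod loop
-- over all n_level*dim bits (distributed cyclically over the dimensions), instead of A's nested
-- level/dimension loops re-extracting each bit by a computed shift; objective: alternative, same cost.


-- ===== PORT A =====
def tc_decoding (treecode : Int) (level : Option Int) (dim : Int) (max_level : Int) : List Int :=
  let n0 : Int := match level with | none => max_level | some l => l
  let n_level : Int := if n0 < 0 then max_level + n0 + 1 else n0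
  let ix : List Int := List.replicate dim.toNat 1
  let ix := (PySem.List.pyRange 0 n_level 1).foldl (fun ix i_level =>
    (PySem.List.pyRange 0 dim 1).foldl (fun ix i_dim =>
      ix.set i_dim.toNat (ix.getD i_dim.toNat 0 +
        (PySem.Int.band (treecode >>> ((i_level + max_level - n_level) * dim + i_dim).toNat) 1
          <<< i_level.toNat))) ix) ix
  match ix with
  | a :: b :: rest => b :: a :: rest
  | _ => []  -- Python raises IndexError here (dim < 2): excluded by Pre_

-- ===== PORT B =====
-- Source B's final `ix[0], ix[1] = ix[1], ix[0]` (Python raises IndexError when dim < 2: excluded by Pre_)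
def tcSwap (L : List Int) : List Int :=
  if h : 2 ≤ L.length then L[1]'(by omega) :: L[0]'(by omega) :: L.drop 2 else []

def tc_decoding_alt (treecode : Int) (level : Option Int) (dim : Int) (max_level : Int) : List Int :=
  let n0 : Int := level.getD max_level
  let n_level : Int := if n0 < 0 then max_level + n0 + 1 else n0
  -- v = treecode >> (max_level - n_level) * dim  (negative shift count = ValueError: excluded by Pre_)
  let s : Int × List Int :=
    (PySem.List.pyRange 0 (n_level * dim) 1).foldl
      (fun (s : Int × List Int) k =>
        -- v, bit = divmod(v, 2); ix[k % dim] += bit << (k // dim)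
        (PySem.Int.floordiv s.1 2,
         s.2.set (PySem.Int.mod k dim).toNat
           (s.2.getD (PySem.Int.mod k dim).toNat 0 +
             PySem.Int.mod s.1 2 <<< (PySem.Int.floordiv k dim).toNat)))
      (treecode >>> ((max_level - n_level) * dim).toNat, List.replicate dim.toNat 1)
  tcSwap s.2

-- ===== PRECONDITION & SPEC =====
-- Pre_ excludes (a) dim < 2, where both programs raise IndexError at the final swap; and
-- (b) a normalized level exceeding max_level: there A raises ValueError when the level is positive
-- (negative shift count), and when the normalized level is still ≤ 0 (only reachable with a negative
-- max_level) A returns the all-ones vector from an empty loop while B's single alignment shift raises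
-- ValueError — B itself raises there, so these degenerate inputs are excluded rather than matched.
def Pre_tc_decoding (treecode : Int) (level : Option Int) (dim : Int) (max_level : Int) : Prop :=
  2 ≤ dim ∧
  (if (level.getD max_level) < 0 then max_level + (level.getD max_level) + 1 else level.getD max_level) ≤ max_level
instance (treecode : Int) (level : Option Int) (dim : Int) (max_level : Int) : Decidable (Pre_tc_decoding treecode level dim max_level) := by unfold Pre_tc_decoding; infer_instance

def pvWitness_tc_decoding : Int × Option Int × Int × Int := (13, some 2, 2, 3)

def Spec_tc_decoding (treecode : Int) (level : Option Int) (dim : Int) (max_level : Int) (out : List Int) : Prop := out = tc_decoding_alt treecode level dim max_level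
instance (treecode : Int) (level : Option Int) (dim : Int) (max_level : Int) (out : List Int) : Decidable (Spec_tc_decoding treecode level dim max_level out) := by unfold Spec_tc_decoding; infer_instance

-- ===== CLAIM (what is proved, stated in full; the proofs are below) =====
def Claim_equal_tc_decoding : Prop := ∀ (treecode : Int) (level : Option Int) (dim : Int) (max_level : Int), Dom_tc_decoding treecode level dim max_level → Pre_tc_decoding treecode level dim max_level → Spec_tc_decoding treecode level dim max_level (tc_decoding treecode level dim max_level)

-- ===== LEMMAS AND PROOFS =====

-- B's flat loop body, with the loop counter already a Nat
def stepN (d : Nat) (s : Int × List Int) (k : Nat) : Int × List Int :=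
  (PySem.Int.floordiv s.1 2,
   s.2.set (k % d) (s.2.getD (k % d) 0 + PySem.Int.mod s.1 2 <<< (k / d)))

-- the common normal form both ports are reduced to: nested Nat loops reading bit i*d+j of v0
def innerF (v0 : Int) (d i : Nat) (ix : List Int) : List Int :=
  (List.range d).foldl
    (fun ix j => ix.set j (ix.getD j 0 + PySem.Int.mod (v0 >>> (i * d + j)) 2 <<< i)) ix

def nestedF (v0 : Int) (d n : Nat) (ix : List Int) : List Int :=
  (List.range n).foldl (fun ix i => innerF v0 d i ix) ix

lemma fdiv_two_eq_shift (x : Int) : PySem.Int.floordiv x 2 = x >>> (1 : Nat) := by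
  rw [Int.shiftRight_eq_div_pow x 1, PySem.Int.floordiv_eq_ediv_of_pos (by omega : (0:Int) < 2)]
  norm_num

-- one level of B's flat loop (the d consecutive counters n*d, …, n*d+d-1) peels d bits off the
-- running quotient and adds them, shifted by the level, to the d coordinates in turn
lemma innerB (d n : Nat) (w : Int) :
    ∀ m, m ≤ d → ∀ ix : List Int,
      ((List.range m).map (fun j => n * d + j)).foldl (stepN d) (w, ix)
        = (w >>> m, (List.range m).foldl
            (fun ix j => ix.set j (ix.getD j 0 + PySem.Int.mod (w >>> j) 2 <<< n)) ix) := by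
  intro m
  induction m with
  | zero => intro _ ix; simp
  | succ m ih =>
    intro hm ix
    rw [List.range_succ, List.map_append, List.foldl_append, List.foldl_append,
      ih (by omega)]
    simp only [List.map_cons, List.map_nil, List.foldl_cons, List.foldl_nil, stepN]
    have hmod : (n * d + m) % d = m := by
      rw [mul_comm, Nat.mul_add_mod]; exact Nat.mod_eq_of_lt (by omega)
    have hdiv : (n * d + m) / d = n := by
      rw [mul_comm, Nat.mul_add_div (by omega), Nat.div_eq_of_lt (by omega)]; omega
    rw [hmod, hdiv, fdiv_two_eq_shift, ← Int.shiftRight_add]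

-- B's whole flat loop over n*d counters equals the nested normal form
lemma flatB (d : Nat) (v0 : Int) :
    ∀ n, ∀ ix : List Int,
      (List.range (n * d)).foldl (stepN d) (v0, ix) = (v0 >>> (n * d), nestedF v0 d n ix) := by
  intro n
  induction n with
  | zero => intro ix; simp [nestedF]
  | succ n ih =>
    intro ix
    have hsplit : (n + 1) * d = n * d + d := by ring
    rw [hsplit, List.range_add, List.foldl_append, ih,
      innerB d n (v0 >>> (n * d)) d le_rfl]
    have hfun : (fun (ix : List Int) j =>
          ix.set j (ix.getD j 0 + PySem.Int.mod (v0 >>> (n * d) >>> j) 2 <<< n))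
          = (fun (ix : List Int) j =>
          ix.set j (ix.getD j 0 + PySem.Int.mod (v0 >>> (n * d + j)) 2 <<< n)) := by
      funext ix j; rw [← Int.shiftRight_add]
    rw [hfun, ← Int.shiftRight_add]
    simp [nestedF, innerF, List.range_succ]

-- A's nested Int loops, once the ranges are over Nat, are the nested normal form as well:
-- its computed shift (i + ml - nl)*dim + j splits as base + (i*d + j)
lemma Aside (tc E : Int) (hE : 0 ≤ E) (D N : Nat) (ix : List Int) :
    (List.range N).foldl (fun ix (i : Nat) => (List.range D).foldl (fun ix (j : Nat) =>
        ix.set j (ix.getD j 0 +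
          PySem.Int.band (tc >>> (((i : Int) + E) * (D : Int) + (j : Int)).toNat) 1 <<< i)) ix) ix
      = nestedF (tc >>> (E * (D : Int)).toNat) D N ix := by
  have hfun : (fun (ix : List Int) (i : Nat) => (List.range D).foldl (fun ix (j : Nat) =>
      ix.set j (ix.getD j 0 +
        PySem.Int.band (tc >>> (((i : Int) + E) * (D : Int) + (j : Int)).toNat) 1 <<< i)) ix)
      = (fun (ix : List Int) (i : Nat) => innerF (tc >>> (E * (D : Int)).toNat) D i ix) := by
    funext ix i
    unfold innerF
    congr 1
    funext ix j
    have hsplit : ((i : Int) + E) * (D : Int) + (j : Int)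
        = E * (D : Int) + ((i * D + j : Nat) : Int) := by push_cast; ring
    have htoNat : (((i : Int) + E) * (D : Int) + (j : Int)).toNat
        = (E * (D : Int)).toNat + (i * D + j) := by
      rw [hsplit, Int.toNat_add (by positivity) (by positivity), Int.toNat_natCast]
    rw [htoNat, Int.shiftRight_add, PySem.Int.band_one]
  rw [hfun]; rfl

-- the two ports' loop results coincide (both are the nested normal form on tc >>> base)
lemma core_eq (tc nl ml dm : Int) (hdim : 2 ≤ dm) (hle : nl ≤ ml) :
    (PySem.List.pyRange 0 nl 1).foldl (fun ix i_level =>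
        (PySem.List.pyRange 0 dm 1).foldl (fun ix i_dim =>
          ix.set i_dim.toNat (ix.getD i_dim.toNat 0 +
            (PySem.Int.band (tc >>> ((i_level + ml - nl) * dm + i_dim).toNat) 1
              <<< i_level.toNat))) ix) (List.replicate dm.toNat 1)
      = ((PySem.List.pyRange 0 (nl * dm) 1).foldl
          (fun (s : Int × List Int) k =>
            (PySem.Int.floordiv s.1 2,
             s.2.set (PySem.Int.mod k dm).toNat
               (s.2.getD (PySem.Int.mod k dm).toNat 0 +
                 PySem.Int.mod s.1 2 <<< (PySem.Int.floordiv k dm).toNat)))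
          (tc >>> ((ml - nl) * dm).toNat, List.replicate dm.toNat 1)).2 := by
  rcases le_or_gt nl 0 with hnp | hnp
  · rw [PySem.List.pyRange_one_eq_nil hnp,
      PySem.List.pyRange_one_eq_nil (b := nl * dm) (by nlinarith)]
    rfl
  · obtain ⟨N, hN⟩ : ∃ N : Nat, (N : Int) = nl := ⟨nl.toNat, Int.toNat_of_nonneg (by omega)⟩
    obtain ⟨D, hD⟩ : ∃ D : Nat, (D : Int) = dm := ⟨dm.toNat, Int.toNat_of_nonneg (by omega)⟩
    have hND : nl * dm = ((N * D : Nat) : Int) := by push_cast; rw [hN, hD]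
    rw [hND, ← hN, ← hD]
    simp only [PySem.List.pyRange_zero_natCast, List.foldl_map]
    have hrep : List.replicate ((D : Int)).toNat (1 : Int) = List.replicate D 1 := by
      rw [Int.toNat_natCast]
    have hB : (List.range (N * D)).foldl
        (fun (s : Int × List Int) (k : Nat) =>
          (PySem.Int.floordiv s.1 2,
           s.2.set (PySem.Int.mod (k : Int) (D : Int)).toNat
             (s.2.getD (PySem.Int.mod (k : Int) (D : Int)).toNat 0 +
               PySem.Int.mod s.1 2 <<< (PySem.Int.floordiv (k : Int) (D : Int)).toNat)))
        (tc >>> ((ml - (N : Int)) * (D : Int)).toNat, List.replicate ((D : Int)).toNat 1)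
        = (List.range (N * D)).foldl (stepN D)
          (tc >>> ((ml - (N : Int)) * (D : Int)).toNat, List.replicate D 1) := by
      rw [hrep]
      congr 1
      funext s k
      simp only [stepN, PySem.Int.mod_natCast, PySem.Int.floordiv_natCast, Int.toNat_natCast]
    rw [hB, flatB D _ N]
    have hA : (List.range N).foldl
        (fun (ix : List Int) (i : Nat) => (List.range D).foldl
          (fun (ix : List Int) (j : Nat) =>
            ix.set ((j : Int)).toNat (ix.getD ((j : Int)).toNat 0 +
              PySem.Int.band (tc >>> (((i : Int) + ml - (N : Int)) * (D : Int) + (j : Int)).toNat) 1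
                <<< ((i : Int)).toNat)) ix)
        (List.replicate ((D : Int)).toNat 1)
        = nestedF (tc >>> ((ml - (N : Int)) * (D : Int)).toNat) D N (List.replicate D 1) := by
      rw [hrep, ← Aside tc (ml - (N : Int)) (by omega) D N]
      congr 1
      funext ix i
      congr 1
      funext ix j
      rw [Int.toNat_natCast, Int.toNat_natCast]
      have harg : ((i : Int) + ml - (N : Int)) = ((i : Int) + (ml - (N : Int))) := by ring
      rw [harg]
    rw [hA]

-- A's trailing swap written as an inline match equals B's tcSwap
lemma swap_match_eq (L : List Int) :
    (match L with | a :: b :: rest => b :: a :: rest | _ => ([] : List Int)) = tcSwap L := by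
  cases L with
  | nil => simp [tcSwap]
  | cons a t => cases t <;> simp [tcSwap]

-- ===== VERDICT (by name: the statement is the Claim_ definition above) =====
theorem tc_decoding_spec : Claim_equal_tc_decoding := by
  intro treecode level dim max_level _dom hpre
  unfold Spec_tc_decoding
  obtain ⟨hdim, hle⟩ := hpre
  cases level with
  | none =>
    dsimp only [Option.getD] at hle
    dsimp only [tc_decoding, tc_decoding_alt, Option.getD]
    exact (swap_match_eq _).trans (congrArg tcSwap (core_eq treecode _ max_level dim hdim hle))
  | some l =>
    dsimp only [Option.getD] at hle
    dsimp only [tc_decoding, tc_decoding_alt, Option.getD]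
    exact (swap_match_eq _).trans (congrArg tcSwap (core_eq treecode _ max_level dim hdim hle))
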